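-- pv_equiv track=rewrite | github.com/Kinglo25/AdventOfCode | 2021/day13/solution.py | fold_paper
-- ===== SOURCE A (Python) =====
-- def fold_paper(fold_instructions, max_x, max_y, paper):
--     for (axis, pos) in fold_instructions:
--         old_max_x = max_x
--         old_max_y = max_y
--         if axis == 'x':
--             max_x = pos
--         elif axis == 'y':
--             max_y = pos
--         folded_paper = [['.' for _ in range(max_x)] for _ in range(max_y)]
--         for i in range(max_y):
--             for j in range(max_x):
--                 # Always keep the unfolded side
--                 if i < len(paper) and j < len(paper[0]) and paper[i][j] == '#':
--                     folded_paper[i][j] = '#'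
--                 # Merge the folded side by mirroring
--                 if axis == 'y':
--                     mirror_i = 2 * pos - i
--                     if mirror_i < len(paper) and j < len(paper[0]) and paper[mirror_i][j] == '#':
--                         folded_paper[i][j] = '#'
--                 elif axis == 'x':
--                     mirror_j = 2 * pos - j
--                     if i < len(paper) and mirror_j < len(paper[0]) and paper[i][mirror_j] == '#':
--                         folded_paper[i][j] = '#'
--         paper = folded_paper
--     return paper
-- ===== SOURCE B (Python) =====
-- def fold_paper(fold_instructions, max_x, max_y, paper):
--     if not fold_instructions:
--         return paper
--     dots = {(y, x) for y, row in enumerate(paper) for x, c in enumerate(row) if c == '#'}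
--     for axis, pos in fold_instructions:
--         if axis == 'x':
--             max_x = pos
--             dots = {(y, x if x < pos else 2 * pos - x) for (y, x) in dots}
--         elif axis == 'y':
--             max_y = pos
--             dots = {(y if y < pos else 2 * pos - y, x) for (y, x) in dots}
--         dots = {(y, x) for (y, x) in dots if 0 <= y < max_y and 0 <= x < max_x}
--     return [['#' if (y, x) in dots else '.' for x in range(max_x)] for y in range(max_y)]
-- ===== Notes on version B (the rewrite author's own statement) =====
-- stated objective: faster
-- what changed: B keeps the dots as a set of coordinates, maps each dot once per fold instruction and materialises the character grid only once at the end, instead of A's rebuilding a full max_y*max_x grid with an inner scan for every fold.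
-- outside the precondition, e.g. on fold_paper([('y', 2)], 2, 2, [['.', '.'], ['#']]): A raises IndexError, B returns [['.', '.'], ['#', '.']]
import Mathlib
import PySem

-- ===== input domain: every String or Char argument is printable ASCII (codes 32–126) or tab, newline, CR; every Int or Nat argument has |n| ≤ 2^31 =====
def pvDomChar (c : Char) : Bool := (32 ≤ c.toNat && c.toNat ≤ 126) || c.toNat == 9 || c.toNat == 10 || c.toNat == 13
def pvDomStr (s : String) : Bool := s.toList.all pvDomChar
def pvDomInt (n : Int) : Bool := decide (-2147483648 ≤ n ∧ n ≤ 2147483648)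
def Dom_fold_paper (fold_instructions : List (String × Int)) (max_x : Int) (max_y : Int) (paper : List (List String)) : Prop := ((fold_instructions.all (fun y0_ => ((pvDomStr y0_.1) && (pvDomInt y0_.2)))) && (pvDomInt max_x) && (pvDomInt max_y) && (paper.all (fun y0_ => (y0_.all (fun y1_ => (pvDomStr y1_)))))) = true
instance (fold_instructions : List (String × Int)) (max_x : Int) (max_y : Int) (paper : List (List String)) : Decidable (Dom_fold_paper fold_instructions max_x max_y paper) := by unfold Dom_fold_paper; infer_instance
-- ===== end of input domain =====

-- B replaces A's per-fold rebuild of the whole max_y*max_x grid by a set of dot coordinates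
-- mapped once per fold and materialised once at the end (measurably faster on large grids).

-- ===== PORT A =====
-- len(paper[0]) as A evaluates it (on the inputs admitted below it is only reached when defined)
def pvW (p : List (List String)) : Int := (((PySem.List.pyGet? p 0).getD []).length : Int)

-- body of A's `for (axis, pos) in fold_instructions` loop; state (max_x, max_y, paper)
def pvStepA (st : Int × Int × List (List String)) (ins : String × Int) : Int × Int × List (List String) :=
  let mx := if ins.1 == "x" then ins.2 else st.1
  let my := if ins.1 == "y" then ins.2 else st.2.1
  let p := st.2.2
  let folded := (PySem.List.pyRange 0 my 1).map (fun i =>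
    (PySem.List.pyRange 0 mx 1).map (fun j =>
      let c := "."
      let c := if i < (p.length : Int) ∧ j < pvW p ∧
                 (PySem.List.pyGet? p i).bind (fun r => PySem.List.pyGet? r j) = some "#"
               then "#" else c
      let c := if ins.1 == "y" then
          (if 2 * ins.2 - i < (p.length : Int) ∧ j < pvW p ∧
             (PySem.List.pyGet? p (2 * ins.2 - i)).bind (fun r => PySem.List.pyGet? r j) = some "#"
           then "#" else c)
        else if ins.1 == "x" then
          (if i < (p.length : Int) ∧ 2 * ins.2 - j < pvW p ∧
             (PySem.List.pyGet? p i).bind (fun r => PySem.List.pyGet? r (2 * ins.2 - j)) = some "#"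
           then "#" else c)
        else c
      c))
  (mx, my, folded)

def fold_paper (fold_instructions : List (String × Int)) (max_x : Int) (max_y : Int) (paper : List (List String)) : List (List String) :=
  (fold_instructions.foldl pvStepA (max_x, max_y, paper)).2.2

-- ===== PORT B =====
-- {(y, x) for y, row in enumerate(paper) for x, c in enumerate(row) if c == '#'}
def pvDotsOf (paper : List (List String)) : PySem.Set (Int × Int) :=
  PySem.Set.ofList ((PySem.List.enumerate paper).flatMap (fun yr =>
    (PySem.List.enumerate yr.2).filterMap (fun xc =>
      if xc.2 = "#" then some (yr.1, xc.1) else none)))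

-- body of B's loop; state (max_x, max_y, dots)
def pvStepB (st : Int × Int × PySem.Set (Int × Int)) (ins : String × Int) : Int × Int × PySem.Set (Int × Int) :=
  let mx := if ins.1 == "x" then ins.2 else st.1
  let my := if ins.1 == "y" then ins.2 else st.2.1
  let dots := st.2.2
  let dots := if ins.1 == "x" then
      PySem.Set.ofList (dots.map (fun d => (d.1, if d.2 < ins.2 then d.2 else 2 * ins.2 - d.2)))
    else if ins.1 == "y" then
      PySem.Set.ofList (dots.map (fun d => ((if d.1 < ins.2 then d.1 else 2 * ins.2 - d.1), d.2)))
    else dots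
  let dots := PySem.Set.ofList (dots.filter (fun d =>
      decide (0 ≤ d.1 ∧ d.1 < my ∧ 0 ≤ d.2 ∧ d.2 < mx)))
  (mx, my, dots)

-- [['#' if (y, x) in dots else '.' for x in range(max_x)] for y in range(max_y)]
def pvGrid (dots : PySem.Set (Int × Int)) (mx my : Int) : List (List String) :=
  (PySem.List.pyRange 0 my 1).map (fun y =>
    (PySem.List.pyRange 0 mx 1).map (fun x => if (y, x) ∈ dots then "#" else "."))

def fold_paper_alt (fold_instructions : List (String × Int)) (max_x : Int) (max_y : Int) (paper : List (List String)) : List (List String) :=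
  if fold_instructions.isEmpty then paper
  else
    let fin := fold_instructions.foldl pvStepB (max_x, max_y, pvDotsOf paper)
    pvGrid fin.2.2 fin.1 fin.2.1

-- ===== PRECONDITION & SPEC =====
-- A guards every access with `j < len(paper[0])`, so the first row's length acts as the paper's
-- width: Pre_ excludes papers with a row shorter than the first (on which A can raise IndexError)
-- and papers with a '#' beyond the first row's length (which A silently truncates away).
def Pre_fold_paper (fold_instructions : List (String × Int)) (max_x : Int) (max_y : Int) (paper : List (List String)) : Prop :=
  ∀ row ∈ paper, (paper.headD []).length ≤ row.length ∧
    ∀ c ∈ row.drop (paper.headD []).length, c ≠ "#"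
instance (fold_instructions : List (String × Int)) (max_x : Int) (max_y : Int) (paper : List (List String)) : Decidable (Pre_fold_paper fold_instructions max_x max_y paper) := by unfold Pre_fold_paper; infer_instance

def pvWitness_fold_paper : (List (String × Int)) × Int × Int × List (List String) :=
  ([("y", 1)], 2, 2, [[".", "#"], ["#", "."]])

def Spec_fold_paper (fold_instructions : List (String × Int)) (max_x : Int) (max_y : Int) (paper : List (List String)) (out : List (List String)) : Prop := out = fold_paper_alt fold_instructions max_x max_y paper
instance (fold_instructions : List (String × Int)) (max_x : Int) (max_y : Int) (paper : List (List String)) (out : List (List String)) : Decidable (Spec_fold_paper fold_instructions max_x max_y paper out) := by unfold Spec_fold_paper; infer_instance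

-- ===== CLAIM (what is proved, stated in full; the proofs are below) =====
def Claim_equal_fold_paper : Prop := ∀ (fold_instructions : List (String × Int)) (max_x : Int) (max_y : Int) (paper : List (List String)), Dom_fold_paper fold_instructions max_x max_y paper → Pre_fold_paper fold_instructions max_x max_y paper → Spec_fold_paper fold_instructions max_x max_y paper (fold_paper fold_instructions max_x max_y paper)

-- ===== LEMMAS AND PROOFS =====

-- rectangular grid
def pvRect (p : List (List String)) : Prop := ∀ row ∈ p, row.length = (p.headD []).length

-- no '#' beyond the first row's length (the part of Pre_ the equivalence proof uses)
def pvGood (p : List (List String)) : Prop :=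
  ∀ row ∈ p, ∀ c ∈ row.drop (p.headD []).length, c ≠ "#"

-- the dot set s represents exactly the '#' cells of p
def pvRep (p : List (List String)) (s : PySem.Set (Int × Int)) : Prop :=
  ∀ y x : Int, ((y, x) ∈ s ↔ 0 ≤ y ∧ 0 ≤ x ∧
    (PySem.List.pyGet? p y).bind (fun r => PySem.List.pyGet? r x) = some "#")

theorem pvW_eq (p : List (List String)) : pvW p = ((p.headD []).length : Int) := by
  cases p <;> simp [pvW, PySem.List.pyGet?_zero]

theorem pvRect_of_const {p : List (List String)} {L : Nat}
    (h : ∀ row ∈ p, row.length = L) : pvRect p := by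
  intro row hrow
  cases p with
  | nil => cases hrow
  | cons a t =>
    have ha := h a (by simp)
    have hr := h row hrow
    simp [List.headD, ha, hr]

theorem pvGood_of_rect {p : List (List String)} (h : pvRect p) : pvGood p := by
  intro row hrow c hc
  rw [← h row hrow, List.drop_length] at hc
  cases hc

theorem pv_mem_bounds {p : List (List String)} {s : PySem.Set (Int × Int)}
    (hrect : pvGood p) (hrep : pvRep p s) {y x : Int} (hm : (y, x) ∈ s) :
    0 ≤ y ∧ y < (p.length : Int) ∧ 0 ≤ x ∧ x < pvW p := by
  obtain ⟨hy, hx, hlook⟩ := (hrep y x).1 hm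
  rw [PySem.List.pyGet?_of_nonneg p hy] at hlook
  cases hrow : p[y.toNat]? with
  | none => rw [hrow] at hlook; simp at hlook
  | some r =>
    rw [hrow] at hlook
    simp only [Option.bind_some] at hlook
    have hylen : y.toNat < p.length := by
      by_contra hcon
      rw [List.getElem?_eq_none (by omega)] at hrow; cases hrow
    have hrmem : r ∈ p := by
      obtain ⟨h1, h2⟩ := List.getElem?_eq_some_iff.1 hrow
      exact h2 ▸ List.getElem_mem h1
    rw [PySem.List.pyGet?_of_nonneg r hx] at hlook
    obtain ⟨hxlen, hcv⟩ := List.getElem?_eq_some_iff.1 hlook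
    have hxw : x.toNat < (p.headD []).length := by
      by_contra hcon
      have hlt : x.toNat - (p.headD []).length < (r.drop (p.headD []).length).length := by
        rw [List.length_drop]; omega
      have hmemd := List.getElem_mem hlt
      rw [List.getElem_drop] at hmemd
      have hix : (p.headD []).length + (x.toNat - (p.headD []).length) = x.toNat := by omega
      simp only [hix] at hmemd
      exact hrect r hrmem _ hmemd (by rw [hcv])
    refine ⟨hy, by omega, hx, ?_⟩
    rw [pvW_eq]; omega

theorem pv_rep_dotsOf (p : List (List String)) : pvRep p (pvDotsOf p) := by
  intro y x
  simp only [pvDotsOf, PySem.Set.mem_ofList, List.mem_flatMap, List.mem_filterMap,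
    PySem.List.mem_enumerate_iff]
  constructor
  · rintro ⟨a, ⟨k, hk, rfl⟩, a1, ⟨m, hm, rfl⟩, hif⟩
    simp only at hif
    split at hif
    · rename_i hc
      injection hif with hif
      have h1 : (0 : Int) + (k : Int) = y := congrArg Prod.fst hif
      have h2 : (0 : Int) + (m : Int) = x := congrArg Prod.snd hif
      refine ⟨by omega, by omega, ?_⟩
      rw [PySem.List.pyGet?_of_nonneg p (by omega)]
      have hyk : y.toNat = k := by omega
      rw [hyk, List.getElem?_eq_getElem hk]
      simp only [Option.bind_some]
      rw [PySem.List.pyGet?_of_nonneg _ (by omega)]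
      have hxm : x.toNat = m := by omega
      rw [hxm, List.getElem?_eq_getElem hm, hc]
    · cases hif
  · rintro ⟨hy, hx, hlook⟩
    rw [PySem.List.pyGet?_of_nonneg p hy] at hlook
    cases hrow : p[y.toNat]? with
    | none => rw [hrow] at hlook; cases hlook
    | some r =>
      rw [hrow] at hlook
      simp only [Option.bind_some] at hlook
      rw [PySem.List.pyGet?_of_nonneg r hx] at hlook
      obtain ⟨hylen, hrv⟩ := List.getElem?_eq_some_iff.1 hrow
      obtain ⟨hxlen, hcv⟩ := List.getElem?_eq_some_iff.1 hlook
      refine ⟨(y, r), ⟨y.toNat, hylen, by rw [hrv]; congr 1; omega⟩,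
        (x, "#"), ⟨x.toNat, hxlen, by rw [hcv]; congr 1; omega⟩, by simp⟩

-- lookup in the materialised grid
theorem pv_grid_lookup (s : PySem.Set (Int × Int)) (mx my y x : Int)
    (hy : 0 ≤ y) (hx : 0 ≤ x) :
    ((PySem.List.pyGet? (pvGrid s mx my) y).bind (fun r => PySem.List.pyGet? r x) = some "#")
    ↔ (y < my ∧ x < mx ∧ (y, x) ∈ s) := by
  unfold pvGrid
  rw [PySem.List.pyGet?_of_nonneg _ hy, PySem.List.pyRange_one 0 my, List.map_map,
    List.getElem?_map]
  by_cases hmy : y < my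
  · rw [List.getElem?_range (by omega : y.toNat < (my - 0).toNat)]
    simp only [Option.map_some, Option.bind_some, Function.comp_apply]
    have hyy : (0 : Int) + (y.toNat : Int) = y := by omega
    rw [hyy, PySem.List.pyGet?_of_nonneg _ hx, PySem.List.pyRange_one 0 mx, List.map_map,
      List.getElem?_map]
    by_cases hmx : x < mx
    · rw [List.getElem?_range (by omega : x.toNat < (mx - 0).toNat)]
      simp only [Option.map_some, Function.comp_apply]
      have hxx : (0 : Int) + (x.toNat : Int) = x := by omega
      rw [hxx]
      by_cases hmem : (y, x) ∈ s
      · simp [hmem, hmy, hmx]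
      · simp [hmem]
    · rw [List.getElem?_eq_none (by simp; omega)]
      simp [hmx]
  · rw [List.getElem?_eq_none (by simp; omega)]
    simp [hmy]

theorem pv_rect_grid (s : PySem.Set (Int × Int)) (mx my : Int) : pvRect (pvGrid s mx my) := by
  apply pvRect_of_const (L := (PySem.List.pyRange 0 mx 1).length)
  intro row hrow
  simp only [pvGrid, List.mem_map] at hrow
  obtain ⟨y, _, rfl⟩ := hrow
  simp

theorem pv_rep_grid {s : PySem.Set (Int × Int)} {mx my : Int}
    (hb : ∀ d ∈ s, 0 ≤ d.1 ∧ d.1 < my ∧ 0 ≤ d.2 ∧ d.2 < mx) :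
    pvRep (pvGrid s mx my) s := by
  intro y x
  constructor
  · intro hm
    obtain ⟨h1, h2, h3, h4⟩ := hb (y, x) hm
    exact ⟨h1, h3, (pv_grid_lookup s mx my y x h1 h3).2 ⟨h2, h4, hm⟩⟩
  · rintro ⟨hy, hx, hlook⟩
    exact ((pv_grid_lookup s mx my y x hy hx).1 hlook).2.2

-- every dot surviving a B-step lies inside the new bounds
theorem pv_stepB_bounds (st : Int × Int × PySem.Set (Int × Int)) (ins : String × Int) :
    ∀ d ∈ (pvStepB st ins).2.2,
      0 ≤ d.1 ∧ d.1 < (pvStepB st ins).2.1 ∧ 0 ≤ d.2 ∧ d.2 < (pvStepB st ins).1 := by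
  intro d hd
  simp only [pvStepB, PySem.Set.mem_ofList, List.mem_filter, decide_eq_true_eq] at hd ⊢
  exact hd.2

-- one step: A's rebuilt grid is the materialisation of B's mapped-and-cropped dot set
theorem pv_ite_or (P Q : Prop) [Decidable P] [Decidable Q] (a b : String) :
    (if Q then a else if P then a else b) = if P ∨ Q then a else b := by
  by_cases hP : P <;> by_cases hQ : Q <;> simp [hP, hQ]

-- one step: A's rebuilt grid is the materialisation of B's mapped-and-cropped dot set
set_option maxHeartbeats 1000000 in
theorem pv_step (mx my : Int) (p : List (List String)) (s : PySem.Set (Int × Int))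
    (ins : String × Int) (hrect : pvGood p) (hrep : pvRep p s) :
    pvStepA (mx, my, p) ins =
      ((pvStepB (mx, my, s) ins).1, (pvStepB (mx, my, s) ins).2.1,
       pvGrid (pvStepB (mx, my, s) ins).2.2 (pvStepB (mx, my, s) ins).1
         (pvStepB (mx, my, s) ins).2.1) := by
  rcases ins with ⟨axis, pos⟩
  by_cases hax : axis = "x"
  · -- fold along x
    subst hax
    simp only [pvStepA, pvStepB]
    norm_num
    simp only [if_neg (show ¬("x" : String) = "y" by decide)]
    unfold pvGrid
    apply List.map_congr_left
    intro i hi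
    rw [PySem.List.mem_pyRange_one] at hi
    apply List.map_congr_left
    intro j hj
    rw [PySem.List.mem_pyRange_one] at hj
    have hmem : ((i, j) ∈ PySem.Set.ofList
        (List.filter
          (fun d => decide (0 ≤ d.1) && (decide (d.1 < my) && (decide (0 ≤ d.2) && decide (d.2 < pos))))
          (PySem.Set.ofList (List.map (fun d => (d.1, if d.2 < pos then d.2 else 2 * pos - d.2)) s)))) ↔
        ((i < (p.length : Int) ∧ j < pvW p ∧
            (PySem.List.pyGet? p i).bind (fun r => PySem.List.pyGet? r j) = some "#") ∨
         (i < (p.length : Int) ∧ 2 * pos - j < pvW p ∧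
            (PySem.List.pyGet? p i).bind (fun a => PySem.List.pyGet? a (2 * pos - j)) = some "#")) := by
      simp only [PySem.Set.mem_ofList, List.mem_filter, List.mem_map, Bool.and_eq_true,
        decide_eq_true_eq]
      constructor
      · rintro ⟨⟨⟨dy, dx⟩, hd, hgd⟩, _⟩
        obtain ⟨h0y, h1y, h0x, h1x⟩ := pv_mem_bounds hrect hrep hd
        rw [Prod.mk.injEq] at hgd
        obtain ⟨h1, h2⟩ := hgd
        by_cases hc : dx < pos
        · rw [if_pos hc] at h2
          exact Or.inl ⟨by omega, by omega,
            by rw [← h1, ← h2]; exact ((hrep dy dx).1 hd).2.2⟩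
        · rw [if_neg hc] at h2
          have hdx : 2 * pos - j = dx := by omega
          refine Or.inr ⟨by omega, by omega, ?_⟩
          rw [← h1, hdx]
          exact ((hrep dy dx).1 hd).2.2
      · rintro (⟨hA1, hA2, hA3⟩ | ⟨hA1, hA2, hA3⟩)
        · refine ⟨⟨(i, j), (hrep i j).2 ⟨by omega, by omega, hA3⟩, ?_⟩, by omega, by omega,
            by omega, by omega⟩
          simp only [if_pos hj.2]
        · refine ⟨⟨(i, 2 * pos - j), (hrep i (2 * pos - j)).2 ⟨by omega, by omega, hA3⟩, ?_⟩,
            by omega, by omega, by omega, by omega⟩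
          rw [if_neg (by omega)]
          congr 1
          omega
    rw [if_congr hmem rfl rfl]
    exact pv_ite_or _ _ _ _
  · by_cases hay : axis = "y"
    · -- fold along y
      subst hay
      simp only [pvStepA, pvStepB]
      norm_num
      simp only [if_neg (show ¬("y" : String) = "x" by decide)]
      unfold pvGrid
      apply List.map_congr_left
      intro i hi
      rw [PySem.List.mem_pyRange_one] at hi
      apply List.map_congr_left
      intro j hj
      rw [PySem.List.mem_pyRange_one] at hj
      have hmem : ((i, j) ∈ PySem.Set.ofList
          (List.filter
            (fun d => decide (0 ≤ d.1) && (decide (d.1 < pos) && (decide (0 ≤ d.2) && decide (d.2 < mx))))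
            (PySem.Set.ofList (List.map (fun d => ((if d.1 < pos then d.1 else 2 * pos - d.1), d.2)) s)))) ↔
          ((i < (p.length : Int) ∧ j < pvW p ∧
              (PySem.List.pyGet? p i).bind (fun r => PySem.List.pyGet? r j) = some "#") ∨
           (2 * pos - i < (p.length : Int) ∧ j < pvW p ∧
              (PySem.List.pyGet? p (2 * pos - i)).bind (fun r => PySem.List.pyGet? r j) = some "#")) := by
        simp only [PySem.Set.mem_ofList, List.mem_filter, List.mem_map, Bool.and_eq_true,
          decide_eq_true_eq]
        constructor
        · rintro ⟨⟨⟨dy, dx⟩, hd, hgd⟩, _⟩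
          obtain ⟨h0y, h1y, h0x, h1x⟩ := pv_mem_bounds hrect hrep hd
          rw [Prod.mk.injEq] at hgd
          obtain ⟨h1, h2⟩ := hgd
          by_cases hc : dy < pos
          · rw [if_pos hc] at h1
            exact Or.inl ⟨by omega, by omega,
              by rw [← h1, ← h2]; exact ((hrep dy dx).1 hd).2.2⟩
          · rw [if_neg hc] at h1
            have hdy : 2 * pos - i = dy := by omega
            refine Or.inr ⟨by omega, by omega, ?_⟩
            rw [hdy, ← h2]
            exact ((hrep dy dx).1 hd).2.2
        · rintro (⟨hA1, hA2, hA3⟩ | ⟨hA1, hA2, hA3⟩)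
          · refine ⟨⟨(i, j), (hrep i j).2 ⟨by omega, by omega, hA3⟩, ?_⟩, by omega, by omega,
              by omega, by omega⟩
            simp only [if_pos hi.2]
          · refine ⟨⟨(2 * pos - i, j), (hrep (2 * pos - i) j).2 ⟨by omega, by omega, hA3⟩, ?_⟩,
              by omega, by omega, by omega, by omega⟩
            rw [if_neg (by omega)]
            congr 1
            omega
      rw [if_congr hmem rfl rfl]
      exact pv_ite_or _ _ _ _
    · -- axis is neither "x" nor "y": the grid is only cropped
      simp only [pvStepA, pvStepB, beq_iff_eq, if_neg hax, if_neg hay]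
      unfold pvGrid
      simp only [Prod.mk.injEq]
      refine ⟨trivial, trivial, ?_⟩
      apply List.map_congr_left
      intro i hi
      rw [PySem.List.mem_pyRange_one] at hi
      apply List.map_congr_left
      intro j hj
      rw [PySem.List.mem_pyRange_one] at hj
      have hmem : ((i, j) ∈ PySem.Set.ofList
          (List.filter (fun d => decide (0 ≤ d.1 ∧ d.1 < my ∧ 0 ≤ d.2 ∧ d.2 < mx)) s)) ↔
          (i < (p.length : Int) ∧ j < pvW p ∧
            (PySem.List.pyGet? p i).bind (fun r => PySem.List.pyGet? r j) = some "#") := by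
        simp only [PySem.Set.mem_ofList, List.mem_filter, decide_eq_true_eq]
        constructor
        · rintro ⟨hd, _⟩
          obtain ⟨h0y, h1y, h0x, h1x⟩ := pv_mem_bounds hrect hrep hd
          exact ⟨by omega, by omega, ((hrep i j).1 hd).2.2⟩
        · rintro ⟨hA1, hA2, hA3⟩
          exact ⟨(hrep i j).2 ⟨by omega, by omega, hA3⟩, by omega, by omega, by omega, by omega⟩
      exact (if_congr hmem rfl rfl).symm

theorem pv_foldl (fi : List (String × Int)) :
    ∀ (mx my : Int) (p : List (List String)) (s : PySem.Set (Int × Int)),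
    pvGood p → pvRep p s → fi ≠ [] →
    fi.foldl pvStepA (mx, my, p) =
      ((fi.foldl pvStepB (mx, my, s)).1, (fi.foldl pvStepB (mx, my, s)).2.1,
       pvGrid (fi.foldl pvStepB (mx, my, s)).2.2 (fi.foldl pvStepB (mx, my, s)).1
         (fi.foldl pvStepB (mx, my, s)).2.1) := by
  induction fi with
  | nil => intro _ _ _ _ _ _ h; exact absurd rfl h
  | cons ins rest ih =>
    intro mx my p s hrect hrep _
    simp only [List.foldl_cons]
    rw [pv_step mx my p s ins hrect hrep]
    rcases hB : pvStepB (mx, my, s) ins with ⟨mx', my', s'⟩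
    cases rest with
    | nil => simp
    | cons r rs =>
      have hb : ∀ d ∈ s', 0 ≤ d.1 ∧ d.1 < my' ∧ 0 ≤ d.2 ∧ d.2 < mx' := by
        have := pv_stepB_bounds (mx, my, s) ins
        rw [hB] at this; exact this
      simpa using ih mx' my' (pvGrid s' mx' my') s' (pvGood_of_rect (pv_rect_grid s' mx' my'))
        (pv_rep_grid hb) (by simp)

-- ===== VERDICT (by name: the statement is the Claim_ definition above) =====
theorem fold_paper_spec : Claim_equal_fold_paper := by
  intro fi mx my paper _ hpre
  unfold Spec_fold_paper fold_paper fold_paper_alt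
  cases fi with
  | nil => simp
  | cons ins rest =>
    have h := pv_foldl (ins :: rest) mx my paper (pvDotsOf paper)
      (fun row hrow => (hpre row hrow).2) (pv_rep_dotsOf paper) (by simp)
    rw [h]
    simp
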